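-- pv_equiv track=rewrite | github.com/Mohamed-Akram-Hl/work | Devoir 7/dev7.py | puissant
-- ===== SOURCE A (Python) =====
-- def puissant(n):
--     p = 1
--     end = n//2 + 1
--     for i in range(2, end):
--         if n%i == 0:
--             p = p * i
--     t = 0
--     while p%int(n) == 0 and p != 0:
--          t =t +1
--          p = p//n
--     return t !=0
-- ===== SOURCE B (Python) =====
-- def puissant(n):
--     p = 1
--     i = 2
--     while i * i <= n:
--         if n % i == 0:
--             q = n // i
--             p = p * i
--             if q != i:
--                 p = p * q
--         i = i + 1
--     return p % n == 0
-- ===== Notes on version B (the rewrite author's own statement) =====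
-- stated objective: faster
-- what changed: B enumerates divisors in complementary pairs (i, n//i) up to sqrt(n) to build the same product of proper divisors and tests n | product directly, replacing A's scan of all candidates up to n//2 and A's repeated-division while-loop.
-- outside the precondition, e.g. on puissant(0): A raises ZeroDivisionError, B raises ZeroDivisionError; on puissant(1): A does not finish within the time limit, B returns True; on puissant(-1): A does not finish within the time limit, B returns True
import Mathlib
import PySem

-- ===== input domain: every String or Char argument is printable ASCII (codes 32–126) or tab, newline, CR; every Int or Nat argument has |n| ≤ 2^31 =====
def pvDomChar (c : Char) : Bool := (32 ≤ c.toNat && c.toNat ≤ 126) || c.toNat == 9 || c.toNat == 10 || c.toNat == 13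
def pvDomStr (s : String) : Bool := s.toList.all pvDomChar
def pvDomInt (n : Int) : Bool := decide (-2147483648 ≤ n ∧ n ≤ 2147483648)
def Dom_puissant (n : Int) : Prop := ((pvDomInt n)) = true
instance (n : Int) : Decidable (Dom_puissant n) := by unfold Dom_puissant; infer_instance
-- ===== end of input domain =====

-- B replaces A's scan of all candidates up to n//2 (and A's repeated-division while-loop) by an
-- enumeration of complementary divisor pairs (i, n//i) up to sqrt(n) and a direct divisibility test.

-- ===== PORT A =====
-- the 'for i in range(2, n//2+1)' product of proper divisors of n
def pvAloop (n : Int) : Int :=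
  (PySem.List.pyRange 2 (PySem.Int.floordiv n 2 + 1) 1).foldl
    (fun p i => if PySem.Int.mod n i == 0 then p * i else p) 1

-- the 'while p % n == 0 and p != 0: t += 1; p //= n' loop; fuel only totalizes the recursion
def pvAwhile (n : Int) : Nat → Int → Int → Int
  | 0, _, t => t
  | fuel+1, p, t =>
    if PySem.Int.mod p n == 0 && p != 0 then
      pvAwhile n fuel (PySem.Int.floordiv p n) (t + 1)
    else t

def puissant (n : Int) : Bool :=
  pvAwhile n ((pvAloop n).natAbs + 1) (pvAloop n) 0 != 0

-- ===== PORT B =====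
-- the 'while i*i <= n' divisor-pair loop of Source B; fuel only totalizes the recursion
def pvBwhile (n : Int) : Nat → Int → Int → Int
  | 0, _, p => p
  | fuel+1, i, p =>
    if i * i ≤ n then
      pvBwhile n fuel (i + 1)
        (if PySem.Int.mod n i == 0 then
          (if PySem.Int.floordiv n i != i then p * i * PySem.Int.floordiv n i else p * i)
         else p)
    else p

def puissant_alt (n : Int) : Bool :=
  PySem.Int.mod (pvBwhile n (n.natAbs + 1) 2 1) n == 0

-- ===== PRECONDITION & SPEC =====
-- Pre_ excludes only n = 0 (A raises ZeroDivisionError) and n = 1, n = -1 (A's while-loop never terminates).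
def Pre_puissant (n : Int) : Prop := n ≠ 0 ∧ n ≠ 1 ∧ n ≠ -1
instance (n : Int) : Decidable (Pre_puissant n) := by unfold Pre_puissant; infer_instance
def pvWitness_puissant : Int := 6

def Spec_puissant (n : Int) (out : Bool) : Prop := out = puissant_alt n
instance (n : Int) (out : Bool) : Decidable (Spec_puissant n out) := by unfold Spec_puissant; infer_instance

-- ===== CLAIM (what is proved, stated in full; the proofs are below) =====
def Claim_equal_puissant : Prop := ∀ (n : Int), Dom_puissant n → Pre_puissant n → Spec_puissant n (puissant n)

-- ===== LEMMAS AND PROOFS =====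

-- the factor A multiplies in at i (as a Nat, for n = ↑m ≥ 2)
def fN (m i : Nat) : Nat := if i ∣ m then i else 1
-- the factor B multiplies in at i
def gN (m i : Nat) : Nat := if i ∣ m then (if m / i = i then i else i * (m / i)) else 1

-- generic accumulate-product-under-condition loop shape
lemma foldl_mul_ite (C : Nat → Bool) (v : Nat → Int) :
    ∀ (N : Nat) (a : Int),
      (List.range N).foldl (fun p k => if C k then p * v k else p) a
        = a * ∏ k ∈ Finset.range N, (if C k then v k else 1) := by
  intro N
  induction N with
  | zero => intro a; simp
  | succ N ih =>
    intro a
    rw [List.range_succ, List.foldl_append, Finset.prod_range_succ, ih]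
    by_cases h : C N <;> simp [List.foldl, h, mul_assoc]

lemma pvAloop_eq (m : Nat) (hm : 2 ≤ m) :
    pvAloop (m : Int) = ((∏ i ∈ Finset.Ico 2 (m / 2 + 1), fN m i : Nat) : Int) := by
  unfold pvAloop
  have h2 : PySem.Int.floordiv (m : Int) 2 + 1 = ((m / 2 + 1 : Nat) : Int) := by
    have h := PySem.Int.floordiv_natCast m 2
    push_cast at h ⊢
    omega
  rw [h2, PySem.List.pyRange_one, List.foldl_map]
  have hN : (((m / 2 + 1 : Nat) : Int) - 2).toNat = m / 2 - 1 := by omega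
  rw [hN, foldl_mul_ite (fun k => PySem.Int.mod (m : Int) (2 + (k : Int)) == 0)
        (fun k => 2 + (k : Int)), one_mul]
  have hfac : ∀ k : Nat,
      (if PySem.Int.mod (m : Int) (2 + (k : Int)) == 0 then (2 + (k : Int)) else 1)
        = ((fN m (2 + k) : Nat) : Int) := by
    intro k
    have hcast : (2 + (k : Int)) = ((2 + k : Nat) : Int) := by push_cast; ring
    rw [hcast]
    by_cases hd : (2 + k) ∣ m
    · have hz : PySem.Int.mod (m : Int) ((2 + k : Nat) : Int) = 0 := by
        rw [PySem.Int.mod_eq_zero_iff_dvd]; exact_mod_cast hd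
      rw [hz]
      simp [fN, hd]
    · have hz : PySem.Int.mod (m : Int) ((2 + k : Nat) : Int) ≠ 0 := fun h =>
        hd (by exact_mod_cast (PySem.Int.mod_eq_zero_iff_dvd _ _).mp h)
      rw [if_neg (by simp only [beq_iff_eq]; exact hz)]
      simp [fN, hd]
  rw [Finset.prod_congr rfl (fun k _ => hfac k),
    Finset.prod_Ico_eq_prod_range (fN m) 2 (m / 2 + 1)]
  have he : m / 2 + 1 - 2 = m / 2 - 1 := by omega
  rw [he]
  push_cast
  exact Finset.prod_congr rfl (fun k _ => rfl)

lemma pvBwhile_eq (m : Nat) :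
    ∀ (fuel c : Nat) (p : Int), 2 ≤ c → Nat.sqrt m + 1 - c < fuel →
      pvBwhile (m : Int) fuel (c : Int) p
        = p * ((∏ i ∈ Finset.Ico c (Nat.sqrt m + 1), gN m i : Nat) : Int) := by
  intro fuel
  induction fuel with
  | zero => intro c p hc hf; exact absurd hf (by omega)
  | succ fuel ih =>
    intro c p hc hf
    simp only [pvBwhile]
    by_cases hcs : c ≤ Nat.sqrt m
    · have hcond : ((c : Int) * (c : Int) ≤ (m : Int)) := by
        exact_mod_cast Nat.le_sqrt.mp hcs
      rw [if_pos hcond]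
      have hstep : (if PySem.Int.mod (m : Int) (c : Int) == 0 then
            (if PySem.Int.floordiv (m : Int) (c : Int) != (c : Int) then
              p * (c : Int) * PySem.Int.floordiv (m : Int) (c : Int)
             else p * (c : Int))
           else p) = p * ((gN m c : Nat) : Int) := by
        have hfd : PySem.Int.floordiv (m : Int) (c : Int) = ((m / c : Nat) : Int) :=
          PySem.Int.floordiv_natCast m c
        by_cases hdvd : c ∣ m
        · have hmodz : PySem.Int.mod (m : Int) (c : Int) = 0 := by
            rw [PySem.Int.mod_eq_zero_iff_dvd]; exact_mod_cast hdvd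
          rw [hmodz, hfd]
          by_cases hsq : m / c = c
          · rw [hsq, if_pos (show ((0 : Int) == 0) = true from rfl), if_neg (by simp)]
            unfold gN
            rw [if_pos hdvd, if_pos hsq]
          · have hbne : (((m / c : Nat) : Int) != (c : Int)) = true := by
              simp only [bne_iff_ne, ne_eq]
              exact_mod_cast hsq
            rw [if_pos (show ((0 : Int) == 0) = true from rfl), if_pos hbne]
            unfold gN
            rw [if_pos hdvd, if_neg hsq]
            push_cast
            ring
        · have hmodnz : PySem.Int.mod (m : Int) (c : Int) ≠ 0 := fun h =>
            hdvd (by exact_mod_cast (PySem.Int.mod_eq_zero_iff_dvd _ _).mp h)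
          rw [if_neg (by simp only [beq_iff_eq]; exact hmodnz)]
          unfold gN
          rw [if_neg hdvd]
          simp
      rw [hstep]
      have hc1 : ((c : Int) + 1) = ((c + 1 : Nat) : Int) := by push_cast; ring
      have hf' : Nat.sqrt m + 1 - (c + 1) < fuel := by omega
      rw [hc1, ih (c + 1) _ (by omega) hf',
        Finset.prod_eq_prod_Ico_succ_bot (show c < Nat.sqrt m + 1 by omega) (gN m),
        Nat.cast_mul]
      ring
    · have hcond : ¬ ((c : Int) * (c : Int) ≤ (m : Int)) := by
        intro h
        exact hcs (Nat.le_sqrt.mpr (by exact_mod_cast h))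
      rw [if_neg hcond, Finset.Ico_eq_empty (by omega)]
      simp

-- the divisor-pairing argument: A's product over [2, m/2] equals B's paired product over [2, sqrt m]
lemma core (m : Nat) (hm : 2 ≤ m) :
    ∏ i ∈ Finset.Ico 2 (m / 2 + 1), fN m i
      = ∏ i ∈ Finset.Ico 2 (Nat.sqrt m + 1), gN m i := by
  have hm0 : m ≠ 0 := by omega
  set D := (Finset.Ico 2 (m / 2 + 1)).filter (fun d => d ∣ m) with hD
  set S := (Finset.Ico 2 (Nat.sqrt m + 1)).filter (fun d => d ∣ m) with hS
  have memD : ∀ d, d ∈ D ↔ d ∣ m ∧ 2 ≤ d ∧ d < m := by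
    intro d
    simp only [hD, Finset.mem_filter, Finset.mem_Ico]
    constructor
    · rintro ⟨⟨h2, hle⟩, hd⟩
      have : m / 2 < m := Nat.div_lt_self (by omega) (by omega)
      exact ⟨hd, h2, by omega⟩
    · rintro ⟨hd, h2, hlt⟩
      refine ⟨⟨h2, ?_⟩, hd⟩
      obtain ⟨k, hk⟩ := hd
      have hk2 : 2 ≤ k := by
        rcases Nat.lt_or_ge k 2 with h | h
        · interval_cases k <;> omega
        · exact h
      have hmul : d * 2 ≤ d * k := Nat.mul_le_mul_left d hk2
      have : d ≤ m / 2 := (Nat.le_div_iff_mul_le (by omega)).mpr (by omega)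
      omega
  have memS : ∀ d, d ∈ S ↔ d ∣ m ∧ 2 ≤ d ∧ d * d ≤ m := by
    intro d
    simp only [hS, Finset.mem_filter, Finset.mem_Ico]
    constructor
    · rintro ⟨⟨h2, hle⟩, hd⟩
      exact ⟨hd, h2, Nat.le_sqrt.mp (by omega)⟩
    · rintro ⟨hd, h2, hsq⟩
      exact ⟨⟨h2, by have := Nat.le_sqrt.mpr hsq; omega⟩, hd⟩
  have hSD : S = D.filter (fun d => d * d ≤ m) := by
    ext d
    simp only [Finset.mem_filter, memS, memD]
    constructor
    · rintro ⟨hd, h2, hsq⟩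
      have h2d : 2 * d ≤ d * d := by nlinarith
      exact ⟨⟨hd, h2, by omega⟩, hsq⟩
    · rintro ⟨⟨hd, h2, _⟩, hsq⟩
      exact ⟨hd, h2, hsq⟩
  have hL : ∏ i ∈ Finset.Ico 2 (m / 2 + 1), fN m i = ∏ d ∈ D, d := by
    rw [hD, Finset.prod_filter]
    exact Finset.prod_congr rfl (fun i _ => by simp [fN])
  have hR : ∏ i ∈ Finset.Ico 2 (Nat.sqrt m + 1), gN m i
      = ∏ d ∈ S, (if m / d = d then d else d * (m / d)) := by
    rw [hS, Finset.prod_filter]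
    exact Finset.prod_congr rfl (fun i _ => by simp [gN])
  have hbij : ∏ d ∈ S.filter (fun d => ¬ m / d = d), (m / d)
      = ∏ d ∈ D.filter (fun d => ¬ d * d ≤ m), d := by
    refine Finset.prod_nbij' (fun a => m / a) (fun b => m / b) ?_ ?_ ?_ ?_ ?_
    · intro a ha
      obtain ⟨haS, hne⟩ := Finset.mem_filter.mp ha
      obtain ⟨hd, h2, hsq⟩ := (memS a).mp haS
      have hk : m / a ∣ m := Nat.div_dvd_of_dvd hd
      have hak : a ≤ m / a := (Nat.le_div_iff_mul_le (by omega)).mpr hsq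
      have haltk : a < m / a := lt_of_le_of_ne hak (fun h => hne h.symm)
      have hmul : a * (m / a) = m := Nat.mul_div_cancel' hd
      have hklt : m / a < m := Nat.div_lt_self (by omega) (by omega)
      have hgt : m < (m / a) * (m / a) := by nlinarith
      rw [Finset.mem_filter, memD]
      beta_reduce
      exact ⟨⟨hk, by omega, hklt⟩, by omega⟩
    · intro b hb
      obtain ⟨hbD, hbig⟩ := Finset.mem_filter.mp hb
      obtain ⟨hd, h2, hlt⟩ := (memD b).mp hbD
      have hk : m / b ∣ m := Nat.div_dvd_of_dvd hd
      have hmul : b * (m / b) = m := Nat.mul_div_cancel' hd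
      have hknz : m / b ≠ 0 := by intro h; rw [h, Nat.mul_zero] at hmul; omega
      have hkne1 : m / b ≠ 1 := by intro h; rw [h, Nat.mul_one] at hmul; omega
      have hkb : m / b < b := by nlinarith
      have hsq : (m / b) * (m / b) ≤ m := by nlinarith
      have hdd : m / (m / b) = b := Nat.div_div_self hd hm0
      have hk2 : 2 ≤ m / b := (Nat.two_le_iff _).mpr ⟨hknz, hkne1⟩
      have hne' : ¬ m / (m / b) = m / b := by rw [hdd]; exact ne_of_gt hkb
      rw [Finset.mem_filter, memS]
      beta_reduce
      exact ⟨⟨hk, hk2, hsq⟩, hne'⟩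
    · intro a ha
      obtain ⟨haS, _⟩ := Finset.mem_filter.mp ha
      obtain ⟨hd, _, _⟩ := (memS a).mp haS
      exact Nat.div_div_self hd hm0
    · intro b hb
      obtain ⟨hbD, _⟩ := Finset.mem_filter.mp hb
      obtain ⟨hd, _, _⟩ := (memD b).mp hbD
      exact Nat.div_div_self hd hm0
    · intro a _; rfl
  have hRHS : ∏ d ∈ S, (if m / d = d then d else d * (m / d))
      = (∏ d ∈ S, d) * ∏ d ∈ S, (if m / d = d then 1 else m / d) := by
    rw [← Finset.prod_mul_distrib]
    exact Finset.prod_congr rfl (fun d _ => by by_cases h : m / d = d <;> simp [h])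
  have h2nd : ∏ d ∈ S, (if m / d = d then 1 else m / d)
      = ∏ d ∈ S.filter (fun d => ¬ m / d = d), (m / d) := by
    rw [Finset.prod_filter (s := S) (fun d => ¬ m / d = d) (fun d => m / d)]
    exact Finset.prod_congr rfl (fun d _ => by by_cases h : m / d = d <;> simp [h])
  have hsplit : ∏ d ∈ D, d
      = (∏ d ∈ D.filter (fun d => d * d ≤ m), d)
        * ∏ d ∈ D.filter (fun d => ¬ d * d ≤ m), d :=
    (Finset.prod_filter_mul_prod_filter_not D _ _).symm
  rw [hL, hR, hsplit, ← hSD, hRHS, h2nd, hbij]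

lemma pvAwhile_le (n : Int) : ∀ (fuel : Nat) (p t : Int), t ≤ pvAwhile n fuel p t := by
  intro fuel
  induction fuel with
  | zero => intro p t; simp [pvAwhile]
  | succ fuel ih =>
    intro p t
    simp only [pvAwhile]
    split
    · exact le_trans (by omega) (ih _ _)
    · exact le_refl t

-- A's while-loop result is nonzero exactly when its entry condition holds
lemma puissant_eq_cond (n : Int) :
    puissant n = (PySem.Int.mod (pvAloop n) n == 0 && pvAloop n != 0) := by
  unfold puissant
  simp only [pvAwhile]
  cases hcond : (PySem.Int.mod (pvAloop n) n == 0 && pvAloop n != 0)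
  · simp
  · have h := pvAwhile_le n (pvAloop n).natAbs (PySem.Int.floordiv (pvAloop n) n) 1
    rw [if_pos rfl]
    simp only [bne_iff_ne, ne_eq, zero_add]
    omega

-- ===== VERDICT (by name: the statement is the Claim_ definition above) =====
theorem puissant_spec : Claim_equal_puissant := by
  intro n hdom hpre
  obtain ⟨h0, h1, hneg1⟩ := hpre
  unfold Spec_puissant
  by_cases hpos : 2 ≤ n
  · -- n ≥ 2
    obtain ⟨m, rfl⟩ : ∃ m : Nat, n = (m : Int) := ⟨n.toNat, (Int.toNat_of_nonneg (by omega)).symm⟩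
    have hm : 2 ≤ m := by exact_mod_cast hpos
    have hPA := pvAloop_eq m hm
    have hPpos : 1 ≤ ∏ i ∈ Finset.Ico 2 (m / 2 + 1), fN m i :=
      Finset.one_le_prod' (fun i hi => by
        have h2i := (Finset.mem_Ico.mp hi).1
        unfold fN; split <;> omega)
    have hfuel : Nat.sqrt m + 1 - 2 < m + 1 := by have := Nat.sqrt_le_self m; omega
    have hB := pvBwhile_eq m (m + 1) 2 1 (le_refl 2) hfuel
    rw [one_mul, Nat.cast_ofNat] at hB
    rw [puissant_eq_cond, hPA]
    unfold puissant_alt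
    rw [Int.natAbs_natCast, hB, ← core m hm]
    have hne : ((((∏ i ∈ Finset.Ico 2 (m / 2 + 1), fN m i : Nat)) : Int) != 0) = true := by
      simp only [bne_iff_ne, ne_eq]
      exact_mod_cast (by omega : (∏ i ∈ Finset.Ico 2 (m / 2 + 1), fN m i) ≠ 0)
    rw [hne, Bool.and_true]
  · -- n ≤ -2
    have hn2 : n ≤ -2 := by omega
    have hfd : PySem.Int.floordiv n 2 = n / 2 := PySem.Int.floordiv_eq_ediv_of_pos (by norm_num)
    have hA1 : pvAloop n = 1 := by
      unfold pvAloop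
      rw [hfd, PySem.List.pyRange_one_eq_nil (by omega)]
      rfl
    rw [puissant_eq_cond, hA1]
    unfold puissant_alt
    simp only [pvBwhile]
    rw [if_neg (by omega : ¬ ((2 : Int) * 2 ≤ n))]
    simp
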